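-- pv_equiv track=rewrite | github.com/halli75/tda-gdl-regimeshift | paper/revisions/compute_m3_permutation_importance.py | _feature_groups_by_prefix
-- ===== SOURCE A (Python) =====
-- def _feature_groups_by_prefix(combined_cols: list[str]) -> dict[str, list[str]]:
--     """Split combined feature columns into interpretable subgroups."""
--     groups: dict[str, list[str]] = {
--         "topology":  [],
--         "classical": [],
--         "xcorr":     [],
--         "sym_onehot": [],
--     }
--     for c in combined_cols:
--         if c.startswith("top_"):
--             groups["topology"].append(c)
--         elif c.startswith("cls_"):
--             groups["classical"].append(c)
--         elif c.startswith("xcorr_"):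
--             groups["xcorr"].append(c)
--         elif c.startswith("sym_"):
--             groups["sym_onehot"].append(c)
--     return groups
-- ===== SOURCE B (Python) =====
-- def _feature_groups_by_prefix(combined_cols: list[str]) -> dict[str, list[str]]:
--     """Split combined feature columns into interpretable subgroups (group-outer)."""
--     mapping = [
--         ("top_", "topology"),
--         ("cls_", "classical"),
--         ("xcorr_", "xcorr"),
--         ("sym_", "sym_onehot"),
--     ]
--     groups: dict[str, list[str]] = {}
--     for prefix, name in mapping:
--         groups[name] = [c for c in combined_cols if c.startswith(prefix)]
--     return groups
-- ===== Notes on version B (the rewrite author's own statement) =====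
-- stated objective: simpler
-- what changed: Inverts the loop nesting: instead of one pass over columns dispatching into four pre-seeded buckets via an if/elif chain, B iterates over a prefix-to-name mapping and builds each group by one filtering pass over the columns; equivalence relies on the four prefixes being mutually exclusive (distinct first characters).
import Mathlib
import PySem

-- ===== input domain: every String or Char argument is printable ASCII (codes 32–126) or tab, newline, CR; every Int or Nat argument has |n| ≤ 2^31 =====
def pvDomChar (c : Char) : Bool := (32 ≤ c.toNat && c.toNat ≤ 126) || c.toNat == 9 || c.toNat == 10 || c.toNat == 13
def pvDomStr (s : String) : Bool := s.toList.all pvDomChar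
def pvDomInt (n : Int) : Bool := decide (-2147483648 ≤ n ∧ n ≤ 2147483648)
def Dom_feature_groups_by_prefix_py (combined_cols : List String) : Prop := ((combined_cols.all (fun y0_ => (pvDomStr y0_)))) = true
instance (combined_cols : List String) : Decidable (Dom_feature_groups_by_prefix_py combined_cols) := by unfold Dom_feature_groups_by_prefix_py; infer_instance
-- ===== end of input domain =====

-- B builds the dict group-outer (one filter pass per prefix group) instead of A's
-- column-outer if/elif dispatch into pre-seeded buckets; simpler decomposition, same cost.


-- ===== PORT A =====
def feature_groups_by_prefix_py (combined_cols : List String) : List (String × List String) :=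
  (combined_cols.foldl
    (fun groups c =>
      if PySem.Str.startswith c "top_" then groups.modify "topology" [] (· ++ [c])
      else if PySem.Str.startswith c "cls_" then groups.modify "classical" [] (· ++ [c])
      else if PySem.Str.startswith c "xcorr_" then groups.modify "xcorr" [] (· ++ [c])
      else if PySem.Str.startswith c "sym_" then groups.modify "sym_onehot" [] (· ++ [c])
      else groups)
    (PySem.Dict.ofList [("topology", []), ("classical", []), ("xcorr", []), ("sym_onehot", [])])).items

-- ===== PORT B =====
def pvMapping : List (String × String) :=
  [("top_", "topology"), ("cls_", "classical"), ("xcorr_", "xcorr"), ("sym_", "sym_onehot")]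

def feature_groups_by_prefix_py_alt (combined_cols : List String) : List (String × List String) :=
  pvMapping.map (fun pn => (pn.2, combined_cols.filter (fun c => PySem.Str.startswith c pn.1)))

-- ===== PRECONDITION & SPEC =====
def Spec_feature_groups_by_prefix_py (combined_cols : List String) (out : List (String × List String)) : Prop := out = feature_groups_by_prefix_py_alt combined_cols
instance (combined_cols : List String) (out : List (String × List String)) : Decidable (Spec_feature_groups_by_prefix_py combined_cols out) := by unfold Spec_feature_groups_by_prefix_py; infer_instance

-- ===== CLAIM (what is proved, stated in full; the proofs are below) =====
def Claim_equal_feature_groups_by_prefix_py : Prop := ∀ (combined_cols : List String), Dom_feature_groups_by_prefix_py combined_cols → Spec_feature_groups_by_prefix_py combined_cols (feature_groups_by_prefix_py combined_cols)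

-- ===== LEMMAS AND PROOFS =====

-- the four prefixes are mutually exclusive: a column cannot start with two of them
theorem pv_sw_false {col p q : String} (h1 : PySem.Str.startswith col p = true)
    (hnp : ¬ (q.toList <+: p.toList)) (hnq : ¬ (p.toList <+: q.toList)) :
    PySem.Str.startswith col q = false := by
  by_contra h
  rw [Bool.not_eq_false] at h
  unfold PySem.Str.startswith at h1 h
  rw [PySem.Chars.startswith_iff] at h1 h
  rcases List.prefix_or_prefix_of_prefix h1 h with hc | hc
  · exact hnq hc
  · exact hnp hc

-- the loop body of A, named for the invariant lemma
def pvStep (groups : PySem.Dict String (List String)) (c : String) : PySem.Dict String (List String) :=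
  if PySem.Str.startswith c "top_" then groups.modify "topology" [] (· ++ [c])
  else if PySem.Str.startswith c "cls_" then groups.modify "classical" [] (· ++ [c])
  else if PySem.Str.startswith c "xcorr_" then groups.modify "xcorr" [] (· ++ [c])
  else if PySem.Str.startswith c "sym_" then groups.modify "sym_onehot" [] (· ++ [c])
  else groups

-- loop invariant: folding A's body over cols appends each group's filtered columns
theorem pv_fold_inv (cols : List String) (t c x s : List String) :
    cols.foldl pvStep (PySem.Dict.mk [("topology", t), ("classical", c), ("xcorr", x), ("sym_onehot", s)]) =
      PySem.Dict.mk
        [("topology", t ++ cols.filter (fun col => PySem.Str.startswith col "top_")),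
         ("classical", c ++ cols.filter (fun col => PySem.Str.startswith col "cls_")),
         ("xcorr", x ++ cols.filter (fun col => PySem.Str.startswith col "xcorr_")),
         ("sym_onehot", s ++ cols.filter (fun col => PySem.Str.startswith col "sym_"))] := by
  induction cols generalizing t c x s with
  | nil => simp
  | cons col rest ih =>
    by_cases h1 : PySem.Str.startswith col "top_" = true
    · have h2 := pv_sw_false h1 (by decide) (by decide) (q := "cls_")
      have h3 := pv_sw_false h1 (by decide) (by decide) (q := "xcorr_")
      have h4 := pv_sw_false h1 (by decide) (by decide) (q := "sym_")
      simp only [List.foldl_cons, pvStep, h1, if_true, List.filter_cons, h2, h3, h4]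
      rw [show ((PySem.Dict.mk [("topology", t), ("classical", c), ("xcorr", x), ("sym_onehot", s)]).modify "topology" [] (· ++ [col])) = PySem.Dict.mk [("topology", t ++ [col]), ("classical", c), ("xcorr", x), ("sym_onehot", s)] by
        simp [PySem.Dict.modify, PySem.Dict.insert, PySem.Dict.getD, PySem.Dict.get?, PySem.Dict.contains]]
      rw [ih]
      simp
    · by_cases h2 : PySem.Str.startswith col "cls_" = true
      · have h3 := pv_sw_false h2 (by decide) (by decide) (q := "xcorr_")
        have h4 := pv_sw_false h2 (by decide) (by decide) (q := "sym_")
        simp only [List.foldl_cons, pvStep, h1, h2, if_true, if_false, List.filter_cons, h3, h4, Bool.false_eq_true]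
        rw [show ((PySem.Dict.mk [("topology", t), ("classical", c), ("xcorr", x), ("sym_onehot", s)]).modify "classical" [] (· ++ [col])) = PySem.Dict.mk [("topology", t), ("classical", c ++ [col]), ("xcorr", x), ("sym_onehot", s)] by
          simp [PySem.Dict.modify, PySem.Dict.insert, PySem.Dict.getD, PySem.Dict.get?, PySem.Dict.contains]]
        rw [ih]
        simp
      · by_cases h3 : PySem.Str.startswith col "xcorr_" = true
        · have h4 := pv_sw_false h3 (by decide) (by decide) (q := "sym_")
          simp only [List.foldl_cons, pvStep, h1, h2, h3, if_true, if_false, List.filter_cons, h4, Bool.false_eq_true]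
          rw [show ((PySem.Dict.mk [("topology", t), ("classical", c), ("xcorr", x), ("sym_onehot", s)]).modify "xcorr" [] (· ++ [col])) = PySem.Dict.mk [("topology", t), ("classical", c), ("xcorr", x ++ [col]), ("sym_onehot", s)] by
            simp [PySem.Dict.modify, PySem.Dict.insert, PySem.Dict.getD, PySem.Dict.get?, PySem.Dict.contains]]
          rw [ih]
          simp
        · by_cases h4 : PySem.Str.startswith col "sym_" = true
          · simp only [List.foldl_cons, pvStep, h1, h2, h3, h4, if_true, if_false, List.filter_cons, Bool.false_eq_true]
            rw [show ((PySem.Dict.mk [("topology", t), ("classical", c), ("xcorr", x), ("sym_onehot", s)]).modify "sym_onehot" [] (· ++ [col])) = PySem.Dict.mk [("topology", t), ("classical", c), ("xcorr", x), ("sym_onehot", s ++ [col])] by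
              simp [PySem.Dict.modify, PySem.Dict.insert, PySem.Dict.getD, PySem.Dict.get?, PySem.Dict.contains]]
            rw [ih]
            simp
          · simp only [List.foldl_cons, pvStep, h1, h2, h3, h4, if_false, List.filter_cons, Bool.false_eq_true]
            rw [ih]

-- ===== VERDICT (by name: the statement is the Claim_ definition above) =====
theorem feature_groups_by_prefix_py_spec : Claim_equal_feature_groups_by_prefix_py := by
  intro cols _
  unfold Spec_feature_groups_by_prefix_py feature_groups_by_prefix_py feature_groups_by_prefix_py_alt pvMapping
  have hinit : PySem.Dict.ofList ([("topology", []), ("classical", []), ("xcorr", []), ("sym_onehot", [])] : List (String × List String)) =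
      PySem.Dict.mk [("topology", []), ("classical", []), ("xcorr", []), ("sym_onehot", [])] := by decide
  rw [hinit, show (fun (groups : PySem.Dict String (List String)) (c : String) =>
      if PySem.Str.startswith c "top_" then groups.modify "topology" [] (· ++ [c])
      else if PySem.Str.startswith c "cls_" then groups.modify "classical" [] (· ++ [c])
      else if PySem.Str.startswith c "xcorr_" then groups.modify "xcorr" [] (· ++ [c])
      else if PySem.Str.startswith c "sym_" then groups.modify "sym_onehot" [] (· ++ [c])
      else groups) = pvStep from rfl, pv_fold_inv]
  rfl
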